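-- pv_equiv track=rewrite | github.com/masashi-y/instance_based_ner | eval_util.py | span_eval
-- ===== SOURCE A (Python) =====
-- from typing import List, Set, Tuple
--
-- Span = Tuple[int, int, str]
--
-- def get_spans(tags: List[str]) -> Set[Span]:
--     def is_start(curr):
--         return curr[0] == "B" or curr[0] == "U"
--
--     def is_continue(curr):
--         return curr[0] == "I" or curr[0] == "L"
--
--     def is_background(curr):
--         return not is_start(curr) and not is_continue(curr)
--
--     def is_seg_start(curr, prev):
--         return is_start(curr) or (
--             is_continue(curr)
--             and (prev is None or is_background(prev) or prev[1:] != curr[1:])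
--         )
--
--     results = set()
--     in_span, span_type = None, None
--     tags = [None] + tags
--
--     for index, (curr, prev) in enumerate(zip(tags[1:], tags[:-1])):
--
--         if is_seg_start(curr, prev):
--             if in_span is not None:
--                 results.add((in_span, index, span_type))
--             in_span, span_type = index, curr[2:]
--         elif not is_continue(curr):
--             if in_span is not None:
--                 results.add((in_span, index, span_type))
--             in_span, span_type = None, None
--
--     if in_span is not None:
--         results.add((in_span, len(tags) - 1, span_type))
--     return results
--
-- def span_eval(preds: List[List[str]], golds: List[List[str]]) -> Tuple[int, int, int]:
--     """
--     both preds and golds are bsz x T (but are lists)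
--     """
--
--     assert len(golds) == len(preds)
--     num_preds, num_golds, num_corrects = 0, 0, 0
--
--     for pred, gold in zip(preds, golds):
--         pred_spans = get_spans(pred)
--         gold_spans = get_spans(gold)
--         num_preds += len(pred_spans)
--         num_golds += len(gold_spans)
--         num_corrects += len(pred_spans & gold_spans)
--
--     return num_preds, num_golds, num_corrects
-- ===== SOURCE B (Python) =====
-- from typing import List, Set, Tuple
--
-- Span = Tuple[int, int, str]
--
--
-- def _role(tag: str) -> str:
--     """'S' for a span start (B/U), 'C' for a continuation (I/L), 'O' otherwise."""
--     c = tag[0]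
--     if c == "B" or c == "U":
--         return "S"
--     if c == "I" or c == "L":
--         return "C"
--     return "O"
--
--
-- def get_spans(tags: List[str]) -> Set[Span]:
--     """Segment scanner: find each segment start, then consume its continuation
--     run in an inner loop, emitting one half-open (start, end, type) span."""
--     spans = set()
--     n = len(tags)
--     i = 0
--     while i < n:
--         if _role(tags[i]) == "O":
--             i += 1
--             continue
--         start, span_type = i, tags[i][2:]
--         j = i + 1
--         while j < n and _role(tags[j]) == "C" and tags[j][1:] == tags[j - 1][1:]:
--             j += 1
--         spans.add((start, j, span_type))
--         i = j
--     return spans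
--
--
-- def span_eval(preds: List[List[str]], golds: List[List[str]]) -> Tuple[int, int, int]:
--     assert len(golds) == len(preds)
--     pairs = [(get_spans(p), get_spans(g)) for p, g in zip(preds, golds)]
--     return (
--         sum(len(p) for p, _ in pairs),
--         sum(len(g) for _, g in pairs),
--         sum(len(p & g) for p, g in pairs),
--     )
-- ===== Notes on version B (the rewrite author's own statement) =====
-- stated objective: faster
-- what changed: get_spans is rewritten from A's single pass over (prev, curr) pairs with seg-start/continue predicate closures and carried open-span state into a two-level segment scanner (outer loop finds each segment start, an inner while consumes its continuation run and yields the half-open end), and the outer tally becomes three sums over a list of per-sentence span-set pairs instead of a running triple of counters.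
import Mathlib
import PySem

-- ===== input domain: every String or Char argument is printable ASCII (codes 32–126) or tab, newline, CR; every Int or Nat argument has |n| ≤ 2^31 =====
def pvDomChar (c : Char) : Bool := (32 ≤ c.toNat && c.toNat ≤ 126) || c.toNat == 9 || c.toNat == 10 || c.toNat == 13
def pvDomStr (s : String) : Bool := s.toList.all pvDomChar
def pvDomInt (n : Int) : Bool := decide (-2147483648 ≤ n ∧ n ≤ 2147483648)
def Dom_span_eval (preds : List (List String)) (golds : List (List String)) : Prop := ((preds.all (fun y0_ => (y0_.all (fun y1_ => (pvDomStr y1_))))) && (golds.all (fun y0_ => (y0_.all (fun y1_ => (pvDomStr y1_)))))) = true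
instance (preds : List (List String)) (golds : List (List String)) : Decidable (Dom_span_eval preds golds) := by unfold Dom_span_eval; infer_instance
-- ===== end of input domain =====

-- B rewrites get_spans as a two-level segment scanner (outer loop finds each segment start, an
-- inner loop consumes its continuation run) instead of A's single pass with prev/curr predicates;
-- the outer tally becomes three sums over a list of per-sentence span-set pairs.

-- ===== PORT A =====
-- curr[0] == "B" or curr[0] == "U"  (Python raises IndexError on "", excluded by Pre_; here [] ↦ false)
def cIsStart : List Char → Bool
  | [] => false
  | c :: _ => c == 'B' || c == 'U'

def cIsCont : List Char → Bool
  | [] => false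
  | c :: _ => c == 'I' || c == 'L'

def cIsBg (s : List Char) : Bool := !cIsStart s && !cIsCont s

-- is_seg_start(curr, prev): prev[1:] / curr[1:] are drop 1
def aSegStart (curr : List Char) (prev : Option (List Char)) : Bool :=
  cIsStart curr ||
    (cIsCont curr &&
      (match prev with
       | none => true
       | some p => cIsBg p || (p.drop 1 != curr.drop 1)))

-- results.add((in_span, index, span_type)) when a span is open
def aClose (res : PySem.Set (Int × Int × List Char)) (i : Int)
    (op : Option (Int × List Char)) : PySem.Set (Int × Int × List Char) :=
  match op with
  | none => res
  | some (s, t) => PySem.Set.add res (s, i, t)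

-- the for-loop over enumerate(zip(tags[1:], tags[:-1])) with state (results, in_span, span_type),
-- plus the final flush at index len(tags) - 1
def aGo : List (List Char) → Option (List Char) → Int →
    PySem.Set (Int × Int × List Char) → Option (Int × List Char) →
    PySem.Set (Int × Int × List Char)
  | [], _, i, res, op => aClose res i op
  | curr :: rest, prev, i, res, op =>
      if aSegStart curr prev then
        aGo rest (some curr) (i + 1) (aClose res i op) (some (i, curr.drop 2))
      else if !cIsCont curr then
        aGo rest (some curr) (i + 1) (aClose res i op) none
      else
        aGo rest (some curr) (i + 1) res op

def aGetSpans (tags : List String) : PySem.Set (Int × Int × List Char) :=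
  aGo (tags.map String.toList) none 0 PySem.Set.empty none

def span_eval (preds : List (List String)) (golds : List (List String)) : Int × Int × Int :=
  (preds.zip golds).foldl
    (fun acc pg =>
      let ps := aGetSpans pg.1
      let gs := aGetSpans pg.2
      (acc.1 + PySem.Set.len ps, acc.2.1 + PySem.Set.len gs,
       acc.2.2 + PySem.Set.len (PySem.Set.inter ps gs)))
    (0, 0, 0)

-- ===== PORT B =====
-- _role(tag): 'S' start, 'C' continuation, 'O' background ([] ↦ 'O'; Python raises on "", excluded by Pre_)
def bRole : List Char → Char
  | [] => 'O'
  | c :: _ => if c == 'B' || c == 'U' then 'S' else if c == 'I' || c == 'L' then 'C' else 'O'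

-- inner while: consume the continuation run, returning (end index, unconsumed suffix)
def bConsume : List (List Char) → Int → List Char → Int × List (List Char)
  | [], j, _ => (j, [])
  | c :: rest, j, p =>
      if bRole c == 'C' && (c.drop 1 == p.drop 1) then bConsume rest (j + 1) c
      else (j, c :: rest)

theorem bConsume_len : ∀ (ts : List (List Char)) (j : Int) (p : List Char),
    (bConsume ts j p).2.length ≤ ts.length := by
  intro ts
  induction ts with
  | nil => intro j p; simp [bConsume]
  | cons c rest ih =>
      intro j p
      simp only [bConsume]
      split
      · exact Nat.le_succ_of_le (ih _ _)
      · simp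

-- outer while over the token list
def bGo : List (List Char) → Int → PySem.Set (Int × Int × List Char) →
    PySem.Set (Int × Int × List Char)
  | [], _, res => res
  | c :: rest, i, res =>
      if bRole c == 'O' then bGo rest (i + 1) res
      else
        let r := bConsume rest (i + 1) c
        bGo r.2 r.1 (PySem.Set.add res (i, r.1, c.drop 2))
termination_by ts _ _ => ts.length
decreasing_by
  · simp
  · have := bConsume_len rest (i + 1) c; simp; omega

def bGetSpans (tags : List String) : PySem.Set (Int × Int × List Char) :=
  bGo (tags.map String.toList) 0 PySem.Set.empty

def span_eval_alt (preds : List (List String)) (golds : List (List String)) : Int × Int × Int :=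
  let pairs := (preds.zip golds).map (fun pg => (bGetSpans pg.1, bGetSpans pg.2))
  ((pairs.map (fun p => PySem.Set.len p.1)).sum,
   (pairs.map (fun p => PySem.Set.len p.2)).sum,
   (pairs.map (fun p => PySem.Set.len (PySem.Set.inter p.1 p.2))).sum)

-- ===== PRECONDITION & SPEC =====
-- Pre_ excludes exactly the inputs where the Python A raises: unequal outer lengths (the assert)
-- and empty tag strings (curr[0] raises IndexError); B raises on the same inputs.
def Pre_span_eval (preds : List (List String)) (golds : List (List String)) : Prop :=
  preds.length = golds.length ∧
  (∀ row ∈ preds, ∀ t ∈ row, t ≠ "") ∧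
  (∀ row ∈ golds, ∀ t ∈ row, t ≠ "")
instance (preds : List (List String)) (golds : List (List String)) : Decidable (Pre_span_eval preds golds) := by unfold Pre_span_eval; infer_instance

def pvWitness_span_eval : List (List String) × List (List String) :=
  ([["B-X", "I-X", "O", "U-Y"]], [["B-X", "O", "B-Y", "L-Y"]])

def Spec_span_eval (preds : List (List String)) (golds : List (List String)) (out : Int × Int × Int) : Prop := out = span_eval_alt preds golds
instance (preds : List (List String)) (golds : List (List String)) (out : Int × Int × Int) : Decidable (Spec_span_eval preds golds out) := by unfold Spec_span_eval; infer_instance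

-- ===== CLAIM (what is proved, stated in full; the proofs are below) =====
def Claim_equal_span_eval : Prop := ∀ (preds : List (List String)) (golds : List (List String)), Dom_span_eval preds golds → Pre_span_eval preds golds → Spec_span_eval preds golds (span_eval preds golds)

-- ===== LEMMAS AND PROOFS =====

theorem cont_not_start {c : List Char} (h : cIsCont c = true) : cIsStart c = false := by
  cases c with
  | nil => simp [cIsCont] at h
  | cons ch t =>
      have h' : ch = 'I' ∨ ch = 'L' := by simpa [cIsCont] using h
      rcases h' with rfl | rfl <;> rfl

theorem role_C (c : List Char) : (bRole c == 'C') = cIsCont c := by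
  cases c with
  | nil => rfl
  | cons ch t =>
      by_cases hB : ch = 'B'; · subst hB; rfl
      by_cases hU : ch = 'U'; · subst hU; rfl
      by_cases hI : ch = 'I'; · subst hI; rfl
      by_cases hL : ch = 'L'; · subst hL; rfl
      simp [bRole, cIsCont, hB, hU, hI, hL]

theorem role_O (c : List Char) : (bRole c == 'O') = cIsBg c := by
  cases c with
  | nil => rfl
  | cons ch t =>
      by_cases hB : ch = 'B'; · subst hB; rfl
      by_cases hU : ch = 'U'; · subst hU; rfl
      by_cases hI : ch = 'I'; · subst hI; rfl
      by_cases hL : ch = 'L'; · subst hL; rfl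
      simp [bRole, cIsBg, cIsStart, cIsCont, hB, hU, hI, hL]

theorem cont_not_bg {c : List Char} (h : cIsCont c = true) : cIsBg c = false := by
  simp [cIsBg, h]

theorem start_not_bg {c : List Char} (h : cIsStart c = true) : cIsBg c = false := by
  simp [cIsBg, h]

-- the core: A's single pass equals B's segment scanner, for both loop states
theorem aGo_eq_bGo : ∀ (ts : List (List Char)),
    (∀ (p : List Char) (i : Int) res s t, cIsBg p = false →
      aGo ts (some p) i res (some (s, t)) =
        bGo (bConsume ts i p).2 (bConsume ts i p).1 (PySem.Set.add res (s, (bConsume ts i p).1, t))) ∧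
    (∀ (i : Int) res (po : Option (List Char)), (po = none ∨ ∃ q, po = some q ∧ cIsBg q = true) →
      aGo ts po i res none = bGo ts i res) := by
  intro ts
  induction ts with
  | nil =>
      constructor
      · intro p i res s t _
        simp [aGo, aClose, bConsume, bGo]
      · intro i res po _
        simp [aGo, aClose, bGo]
  | cons c rest ih =>
      obtain ⟨ih1, ih2⟩ := ih
      have hGoNe : ∀ (i : Int) res, (bRole c == 'O') = false →
          bGo (c :: rest) i res =
            bGo (bConsume rest (i + 1) c).2 (bConsume rest (i + 1) c).1
              (PySem.Set.add res (i, (bConsume rest (i + 1) c).1, c.drop 2)) := by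
        intro i res hO
        rw [bGo]; simp [hO]
      have hGoO : ∀ (i : Int) res, (bRole c == 'O') = true →
          bGo (c :: rest) i res = bGo rest (i + 1) res := by
        intro i res hO
        rw [bGo]; simp [hO]
      constructor
      · intro p i res s t hp
        by_cases hcont : cIsCont c = true
        · have hOfalse : (bRole c == 'O') = false := by rw [role_O]; exact cont_not_bg hcont
          by_cases hsuf : c.drop 1 = p.drop 1
          · -- continuation matches: A extends the open span, B's inner loop consumes it
            have hseg : aSegStart c (some p) = false := by
              simp [aSegStart, cont_not_start hcont, hp, hsuf]
            have hcons : bConsume (c :: rest) i p = bConsume rest (i + 1) c := by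
              simp [bConsume, role_C, hcont, hsuf]
            rw [hcons,
              show aGo (c :: rest) (some p) i res (some (s, t)) =
                  aGo rest (some c) (i + 1) res (some (s, t)) from by
                simp [aGo, hseg, hcont]]
            exact ih1 c (i + 1) res s t (cont_not_bg hcont)
          · -- continuation with a different suffix: a fresh segment starts here
            have hsuf' : ¬p.tail = c.tail := fun h => hsuf (by simp [List.drop_one, h])
            have hseg : aSegStart c (some p) = true := by
              simp [aSegStart, hcont, hsuf']
            have hcons : bConsume (c :: rest) i p = (i, c :: rest) := by
              simp only [bConsume, Bool.and_eq_true, beq_iff_eq]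
              rw [if_neg]
              intro h
              exact hsuf h.2
            rw [hcons]
            rw [show aGo (c :: rest) (some p) i res (some (s, t)) =
                  aGo rest (some c) (i + 1) (PySem.Set.add res (s, i, t))
                    (some (i, c.drop 2)) from by
                simp [aGo, hseg, aClose]]
            rw [hGoNe i _ hOfalse]
            exact ih1 c (i + 1) _ i (c.drop 2) (cont_not_bg hcont)
        · have hcont' : cIsCont c = false := by simpa using hcont
          have hcons : bConsume (c :: rest) i p = (i, c :: rest) := by
            simp [bConsume, role_C, hcont']
          rw [hcons]
          by_cases hstart : cIsStart c = true
          · -- start token: A closes and reopens, B opens a new segment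
            have hOfalse : (bRole c == 'O') = false := by rw [role_O]; exact start_not_bg hstart
            have hseg : aSegStart c (some p) = true := by simp [aSegStart, hstart]
            rw [show aGo (c :: rest) (some p) i res (some (s, t)) =
                  aGo rest (some c) (i + 1) (PySem.Set.add res (s, i, t))
                    (some (i, c.drop 2)) from by
                simp [aGo, hseg, aClose]]
            rw [hGoNe i _ hOfalse]
            exact ih1 c (i + 1) _ i (c.drop 2) (by simp [cIsBg, hstart])
          · -- background token: both close the span and move on
            have hstart' : cIsStart c = false := by simpa using hstart
            have hbg : cIsBg c = true := by simp [cIsBg, hstart', hcont']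
            have hOtrue : (bRole c == 'O') = true := by rw [role_O]; exact hbg
            have hseg : aSegStart c (some p) = false := by
              simp [aSegStart, hstart', hcont']
            rw [show aGo (c :: rest) (some p) i res (some (s, t)) =
                  aGo rest (some c) (i + 1) (PySem.Set.add res (s, i, t)) none from by
                simp [aGo, hseg, hcont', aClose]]
            rw [hGoO i _ hOtrue]
            exact ih2 (i + 1) _ (some c) (Or.inr ⟨c, rfl, hbg⟩)
      · intro i res po hpo
        have hseg_of : (cIsStart c = true ∨ cIsCont c = true) → aSegStart c po = true := by
          intro h
          rcases hpo with rfl | ⟨q, rfl, hq⟩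
          · rcases h with h | h <;> simp [aSegStart, h]
          · rcases h with h | h <;> simp [aSegStart, h, hq]
        by_cases hbg : cIsBg c = true
        · have hstart' : cIsStart c = false := by
            cases h : cIsStart c
            · rfl
            · rw [start_not_bg h] at hbg; exact absurd hbg (by decide)
          have hcont' : cIsCont c = false := by
            cases h : cIsCont c
            · rfl
            · rw [cont_not_bg h] at hbg; exact absurd hbg (by decide)
          have hseg : aSegStart c po = false := by
            simp [aSegStart, hstart', hcont']
          rw [show aGo (c :: rest) po i res none =
                aGo rest (some c) (i + 1) res none from by
              simp [aGo, hseg, hcont', aClose]]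
          rw [hGoO i res (by rw [role_O]; exact hbg)]
          exact ih2 (i + 1) res (some c) (Or.inr ⟨c, rfl, hbg⟩)
        · have hbg' : cIsBg c = false := by simpa using hbg
          have hsc : cIsStart c = true ∨ cIsCont c = true := by
            cases hs : cIsStart c
            · cases hc : cIsCont c
              · simp [cIsBg, hs, hc] at hbg'
              · exact Or.inr rfl
            · exact Or.inl rfl
          have hseg : aSegStart c po = true := hseg_of hsc
          rw [show aGo (c :: rest) po i res none =
                aGo rest (some c) (i + 1) res (some (i, c.drop 2)) from by
              simp [aGo, hseg, aClose]]
          rw [hGoNe i res (by rw [role_O]; exact hbg')]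
          exact ih1 c (i + 1) res i (c.drop 2) hbg'

theorem getSpans_eq (tags : List String) : aGetSpans tags = bGetSpans tags := by
  unfold aGetSpans bGetSpans
  exact (aGo_eq_bGo (tags.map String.toList)).2 0 PySem.Set.empty none (Or.inl rfl)

theorem outer_fold (L : List (List String × List String)) :
    ∀ (a b c : Int),
    L.foldl
      (fun acc pg =>
        let ps := aGetSpans pg.1
        let gs := aGetSpans pg.2
        (acc.1 + PySem.Set.len ps, acc.2.1 + PySem.Set.len gs,
         acc.2.2 + PySem.Set.len (PySem.Set.inter ps gs)))
      (a, b, c)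
    = (a + (L.map (fun pg => PySem.Set.len (bGetSpans pg.1))).sum,
       b + (L.map (fun pg => PySem.Set.len (bGetSpans pg.2))).sum,
       c + (L.map (fun pg => PySem.Set.len (PySem.Set.inter (bGetSpans pg.1) (bGetSpans pg.2)))).sum) := by
  induction L with
  | nil => intro a b c; simp
  | cons pg rest ih =>
      intro a b c
      simp only [List.foldl_cons, List.map_cons, List.sum_cons]
      rw [ih]
      simp only [getSpans_eq, Prod.mk.injEq]
      refine ⟨by ring, by ring, by ring⟩

-- ===== VERDICT (by name: the statement is the Claim_ definition above) =====
theorem span_eval_spec : Claim_equal_span_eval := by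
  intro preds golds _ _
  unfold Spec_span_eval span_eval span_eval_alt
  simp only [outer_fold, List.map_map, zero_add]
  rfl
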